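-- pv_equiv track=rewrite | github.com/nicolasabermudez1/rfx-assistant | src/rfx_assistant/ui/team.py | centrica_email
-- ===== SOURCE A (Python) =====
-- def centrica_email(name: str) -> str:
--     """Derive an @centrica.com address from a person's name.
--
--     'Jane Smith'  -> 'jane.smith@centrica.com'
--     'Jane'        -> 'jane@centrica.com'
--     ''            -> 'team@centrica.com'
--     Reminders always use this — colleagues are Centrica employees.
--     """
--     parts = [p for p in (name or "").lower().split() if p]
--     if not parts:
--         return "team@centrica.com"
--     safe = [
--         "".join(ch for ch in p if ch.isalnum() or ch == "-")
--         for p in parts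
--     ]
--     safe = [s for s in safe if s]
--     if not safe:
--         return "team@centrica.com"
--     return f"{'.'.join(safe)}@centrica.com"
-- ===== SOURCE B (Python) =====
-- def centrica_email(name: str) -> str:
--     """Derive an @centrica.com address from a person's name.
--
--     Single-pass state machine: walk the lowercased string once with a
--     current-token buffer, flushing on whitespace, keeping only alnum/'-'
--     characters; no split() and no per-token passes.
--     """
--     tokens = []
--     cur = ""
--     for ch in (name or "").lower():
--         if ch.isspace():
--             if cur:
--                 tokens.append(cur)
--                 cur = ""
--         elif ch.isalnum() or ch == "-":
--             cur += ch
--     if cur: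
--         tokens.append(cur)
--     if not tokens:
--         return "team@centrica.com"
--     return ".".join(tokens) + "@centrica.com"
-- ===== Notes on version B (the rewrite author's own statement) =====
-- stated objective: alternative
-- what changed: B replaces A's split-then-per-token-filter-then-drop-empties pipeline by a single left-to-right state machine over the lowercased string that builds the tokens itself (flush on whitespace, keep alnum/'-'), so no split() and no intermediate token lists exist.
import Mathlib
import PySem

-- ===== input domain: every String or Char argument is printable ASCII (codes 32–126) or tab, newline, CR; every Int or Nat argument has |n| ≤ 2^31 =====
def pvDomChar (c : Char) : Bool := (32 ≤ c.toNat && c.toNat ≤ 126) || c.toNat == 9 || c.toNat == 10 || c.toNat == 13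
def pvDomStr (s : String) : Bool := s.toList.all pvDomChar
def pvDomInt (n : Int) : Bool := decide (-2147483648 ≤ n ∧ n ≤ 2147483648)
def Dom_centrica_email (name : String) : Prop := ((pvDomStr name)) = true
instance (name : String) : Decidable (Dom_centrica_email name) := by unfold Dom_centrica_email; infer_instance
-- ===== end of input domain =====

-- B replaces A's split-then-per-token-filter pipeline by a single-pass state
-- machine that builds the tokens itself (objective: alternative, same cost).

-- ===== PORT A =====
def centrica_email (name : String) : String :=
  -- parts = [p for p in (name or "").lower().split() if p]
  let parts := (PySem.Chars.split₀ (PySem.Chars.lower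
      (if name = "" then "" else name).toList)).filter (fun p => p ≠ [])
  if parts = [] then "team@centrica.com"
  else
    -- safe = ["".join(ch for ch in p if ch.isalnum() or ch == "-") for p in parts]
    let safe := parts.map (fun p => p.filter (fun ch => PySem.Chars.isalnum ch || ch == '-'))
    -- safe = [s for s in safe if s]
    let safe2 := safe.filter (fun s => s ≠ [])
    if safe2 = [] then "team@centrica.com"
    -- f"{'.'.join(safe)}@centrica.com"
    else String.ofList (PySem.Chars.join ['.'] safe2 ++ "@centrica.com".toList)

-- ===== PORT B =====
-- the loop of Source B: cur is kept reversed, tokens accumulated reversed and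
-- reversed once at the end (the standard accumulator transcription)
def ceGo : List Char → List Char → List (List Char) → List (List Char)
  | [], cur, acc => if cur = [] then acc.reverse else (cur.reverse :: acc).reverse
  | c :: rest, cur, acc =>
    if PySem.Chars.isspace c then
      -- whitespace: flush the current token if nonempty
      if cur = [] then ceGo rest [] acc else ceGo rest [] (cur.reverse :: acc)
    else if PySem.Chars.isalnum c || c == '-' then
      -- legal character: extend the current token
      ceGo rest (c :: cur) acc
    else
      -- anything else: skip
      ceGo rest cur acc

def centrica_email_alt (name : String) : String :=
  let tokens := ceGo (PySem.Chars.lower (if name = "" then "" else name).toList) [] []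
  if tokens = [] then "team@centrica.com"
  else String.ofList (PySem.Chars.join ['.'] tokens ++ "@centrica.com".toList)

-- ===== PRECONDITION & SPEC =====
def Spec_centrica_email (name : String) (out : String) : Prop := out = centrica_email_alt name
instance (name : String) (out : String) : Decidable (Spec_centrica_email name out) := by unfold Spec_centrica_email; infer_instance

-- ===== CLAIM =====
def Claim_equal_centrica_email : Prop := ∀ (name : String), Dom_centrica_email name → Spec_centrica_email name (centrica_email name)

-- ===== LEMMAS AND PROOFS =====

-- B's state machine is split₀'s worker run on the string with illegal
-- (non-alnum, non-'-', non-space) characters deleted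
theorem pv_ceGo_eq (cs : List Char) : ∀ (cur : List Char) (acc : List (List Char)),
    ceGo cs cur acc
    = PySem.Chars.split₀.go
        (cs.filter (fun ch => PySem.Chars.isalnum ch || ch == '-' || PySem.Chars.isspace ch))
        cur acc := by
  induction cs with
  | nil =>
    intro cur acc
    rw [List.filter_nil, PySem.Chars.split₀.go.eq_1, ceGo]
    by_cases hcur : cur = [] <;> simp [hcur, List.isEmpty_iff]
  | cons c rest ih =>
    intro cur acc
    by_cases hsp : PySem.Chars.isspace c = true
    · have hkeep : List.filter (fun ch => PySem.Chars.isalnum ch || ch == '-' || PySem.Chars.isspace ch) (c :: rest)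
          = c :: List.filter (fun ch => PySem.Chars.isalnum ch || ch == '-' || PySem.Chars.isspace ch) rest := by
        simp [hsp]
      rw [hkeep, PySem.Chars.split₀.go.eq_2, if_pos hsp, ceGo, if_pos hsp]
      by_cases hcur : cur = [] <;> simp [hcur, List.isEmpty_iff, ih]
    · have hsp' : PySem.Chars.isspace c = false := by simpa using hsp
      by_cases hpred : (PySem.Chars.isalnum c || c == '-') = true
      · have hkeep : List.filter (fun ch => PySem.Chars.isalnum ch || ch == '-' || PySem.Chars.isspace ch) (c :: rest)
            = c :: List.filter (fun ch => PySem.Chars.isalnum ch || ch == '-' || PySem.Chars.isspace ch) rest := by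
          simp [hpred]
        rw [hkeep, PySem.Chars.split₀.go.eq_2, if_neg (by simp [hsp']), ceGo, if_neg (by simp [hsp']), if_pos hpred]
        exact ih (c :: cur) acc
      · have hpred' : (PySem.Chars.isalnum c || c == '-') = false := by simpa using hpred
        have hkeep : List.filter (fun ch => PySem.Chars.isalnum ch || ch == '-' || PySem.Chars.isspace ch) (c :: rest)
            = List.filter (fun ch => PySem.Chars.isalnum ch || ch == '-' || PySem.Chars.isspace ch) rest := by
          simp [hpred', hsp']
        rw [hkeep, ceGo, if_neg (by simp [hsp']), if_neg (by simp [hpred'])]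
        exact ih cur acc

-- pushing the token filter through split₀'s worker
theorem pv_go_filter (cs : List Char) : ∀ (cur : List Char) (acc : List (List Char)),
    PySem.Chars.split₀.go
      (cs.filter (fun ch => PySem.Chars.isalnum ch || ch == '-' || PySem.Chars.isspace ch))
      (cur.filter (fun ch => PySem.Chars.isalnum ch || ch == '-'))
      ((acc.map (fun t => t.filter (fun ch => PySem.Chars.isalnum ch || ch == '-'))).filter
        (fun t => t ≠ []))
    = ((PySem.Chars.split₀.go cs cur acc).map
        (fun t => t.filter (fun ch => PySem.Chars.isalnum ch || ch == '-'))).filter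
        (fun t => t ≠ []) := by
  induction cs with
  | nil =>
    intro cur acc
    rw [List.filter_nil, PySem.Chars.split₀.go.eq_1, PySem.Chars.split₀.go.eq_1]
    by_cases hc : cur.filter (fun ch => PySem.Chars.isalnum ch || ch == '-') = []
    · by_cases hcur : cur = [] <;>
        simp [hcur, hc, List.isEmpty_iff, List.filter_reverse, List.map_reverse]
    · have hcur : cur ≠ [] := by rintro rfl; simp at hc
      simp [hcur, hc, List.isEmpty_iff, List.filter_reverse, List.map_reverse]
  | cons c rest ih =>
    intro cur acc
    by_cases hsp : PySem.Chars.isspace c = true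
    · have hkeep : List.filter (fun ch => PySem.Chars.isalnum ch || ch == '-' || PySem.Chars.isspace ch) (c :: rest)
          = c :: List.filter (fun ch => PySem.Chars.isalnum ch || ch == '-' || PySem.Chars.isspace ch) rest := by
        simp [hsp]
      rw [hkeep, PySem.Chars.split₀.go.eq_2, PySem.Chars.split₀.go.eq_2, if_pos hsp, if_pos hsp]
      by_cases hc : cur.filter (fun ch => PySem.Chars.isalnum ch || ch == '-') = []
      · by_cases hcur : cur = []
        · subst hcur
          simp only [List.filter_nil, List.isEmpty_nil, if_true]
          exact ih [] acc
        · rw [if_pos (by simp [hc]), if_neg (by simp [List.isEmpty_iff, hcur])]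
          simpa [List.filter_reverse, hc] using ih [] (cur.reverse :: acc)
      · have hcur : cur ≠ [] := by rintro rfl; simp at hc
        rw [if_neg (by simp [List.isEmpty_iff, hc]), if_neg (by simp [List.isEmpty_iff, hcur])]
        simpa [List.filter_reverse, hc] using ih [] (cur.reverse :: acc)
    · have hsp' : PySem.Chars.isspace c = false := by simpa using hsp
      by_cases hpred : (PySem.Chars.isalnum c || c == '-') = true
      · have hkeep : List.filter (fun ch => PySem.Chars.isalnum ch || ch == '-' || PySem.Chars.isspace ch) (c :: rest)
            = c :: List.filter (fun ch => PySem.Chars.isalnum ch || ch == '-' || PySem.Chars.isspace ch) rest := by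
          simp [hpred]
        rw [hkeep, PySem.Chars.split₀.go.eq_2, PySem.Chars.split₀.go.eq_2, if_neg (by simp [hsp']), if_neg (by simp [hsp']),
          ← ih (c :: cur) acc]
        simp [hpred]
      · have hpred' : (PySem.Chars.isalnum c || c == '-') = false := by simpa using hpred
        have hkeep : List.filter (fun ch => PySem.Chars.isalnum ch || ch == '-' || PySem.Chars.isspace ch) (c :: rest)
            = List.filter (fun ch => PySem.Chars.isalnum ch || ch == '-' || PySem.Chars.isspace ch) rest := by
          simp [hpred', hsp']
        rw [hkeep, PySem.Chars.split₀.go.eq_2, if_neg (by simp [hsp']), ← ih (c :: cur) acc]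
        simp [hpred']

-- B's tokens are A's map-filtered, empties-dropped tokens
theorem pv_tokens_eq (cs : List Char) :
    ceGo cs [] []
    = ((PySem.Chars.split₀ cs).map
        (fun t => t.filter (fun ch => PySem.Chars.isalnum ch || ch == '-'))).filter
        (fun t => t ≠ []) := by
  rw [pv_ceGo_eq]
  simpa [PySem.Chars.split₀] using pv_go_filter cs [] []

-- dropping empty tokens before mapping a filter changes nothing after the final empty-drop
theorem pv_prefilter_nop {α : Type} (f : List α → List α) (xs : List (List α)) (hf : f [] = []) :
    (((xs.filter (fun t => t ≠ [])).map f).filter (fun t => t ≠ []))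
    = ((xs.map f).filter (fun t => t ≠ [])) := by
  induction xs with
  | nil => rfl
  | cons x xs ih =>
    by_cases hx : x = []
    · subst hx; simpa [hf] using ih
    · by_cases hfx : f x = []
      · simpa [List.filter_cons, hx, hfx] using ih
      · simpa [List.filter_cons, hx, hfx] using ih

-- ===== VERDICT =====
theorem centrica_email_spec : Claim_equal_centrica_email := by
  intro name _
  unfold Spec_centrica_email centrica_email centrica_email_alt
  simp only [pv_tokens_eq,
    pv_prefilter_nop (fun t => t.filter (fun ch => PySem.Chars.isalnum ch || ch == '-')) _ rfl]
  set S2 := (((PySem.Chars.split₀ (PySem.Chars.lower (if name = "" then "" else name).toList)).map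
      (fun t => t.filter (fun ch => PySem.Chars.isalnum ch || ch == '-'))).filter
      (fun t => t ≠ [])) with hS2
  by_cases h2 : S2 = []
  · rw [if_pos h2]
    by_cases h1 : ((PySem.Chars.split₀
        (PySem.Chars.lower (if name = "" then "" else name).toList)).filter
        (fun p => p ≠ [])) = []
    · rw [if_pos h1]
    · rw [if_neg h1]
  · have h1 : ((PySem.Chars.split₀
        (PySem.Chars.lower (if name = "" then "" else name).toList)).filter
        (fun p => p ≠ [])) ≠ [] := by
      intro h1
      apply h2
      rw [hS2, ← pv_prefilter_nop (fun t => t.filter (fun ch => PySem.Chars.isalnum ch || ch == '-')) _ rfl, h1]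
      rfl
    rw [if_neg h1]
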